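-- pv_equiv track=rewrite | github.com/MaximoDouglas/coding-challenges-portfolio | equal-sides-of-an-array/solution.py | find_even_index
-- ===== SOURCE A (Python) =====
-- def find_even_index(arr):
--     s = sum(arr)
--
--     left = 0
--     for i in range(len(arr)):
--         right = s - left - arr[i]
--
--         if (left == right):
--             return i
--
--         left += arr[i]
--
--     return -1
-- ===== SOURCE B (Python) =====
-- def find_even_index(arr):
--     for i in range(len(arr)):
--         if sum(arr[:i]) == sum(arr[i+1:]):
--             return i
--     return -1
-- ===== Notes on version B (the rewrite author's own statement) =====
-- stated objective: simpler
-- what changed: Replaces A's single incremental running-sum pass (total precomputed, right derived from s - left - arr[i]) with a naive double-scan that re-sums both slices arr[:i] and arr[i+1:] at every index.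
import Mathlib
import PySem

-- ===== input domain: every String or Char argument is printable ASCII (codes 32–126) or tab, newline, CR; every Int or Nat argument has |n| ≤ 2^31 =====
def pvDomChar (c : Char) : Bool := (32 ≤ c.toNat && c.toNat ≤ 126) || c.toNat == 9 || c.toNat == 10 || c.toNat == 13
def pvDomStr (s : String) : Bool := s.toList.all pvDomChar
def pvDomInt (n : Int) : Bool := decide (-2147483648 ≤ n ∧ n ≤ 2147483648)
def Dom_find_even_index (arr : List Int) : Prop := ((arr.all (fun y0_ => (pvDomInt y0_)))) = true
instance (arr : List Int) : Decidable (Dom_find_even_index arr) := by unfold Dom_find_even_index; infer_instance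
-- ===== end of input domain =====

-- B replaces A's incremental running-sum pass with a naive double-scan re-summing both slices at each index; same return value, no side effects.
-- ===== PORT A =====
-- loop 'for i in range(len(arr))' walking arr with index i, running sum 'left'
def findA (s : Int) : List Int → Nat → Int → Int
  | [], _, _ => -1
  | x :: rest, i, left =>
      let right := s - left - x
      if left = right then (i : Int) else findA s rest (i + 1) (left + x)

def find_even_index (arr : List Int) : Int := findA arr.sum arr 0 0

-- ===== PORT B =====
-- loop 'for i in range(len(arr))': fuel = indices left to try; arr[:i] = take i, arr[i+1:] = drop (i+1)
def findB (arr : List Int) : Nat → Nat → Int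
  | 0, _ => -1
  | n + 1, i =>
      if (arr.take i).sum = (arr.drop (i + 1)).sum then (i : Int)
      else findB arr n (i + 1)

def find_even_index_alt (arr : List Int) : Int := findB arr arr.length 0

-- ===== PRECONDITION & SPEC =====
def Spec_find_even_index (arr : List Int) (out : Int) : Prop := out = find_even_index_alt arr
instance (arr : List Int) (out : Int) : Decidable (Spec_find_even_index arr out) := by unfold Spec_find_even_index; infer_instance

-- ===== CLAIM (what is proved, stated in full; the proofs are below) =====
def Claim_equal_find_even_index : Prop := ∀ (arr : List Int), Dom_find_even_index arr → Spec_find_even_index arr (find_even_index arr)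

-- ===== LEMMAS AND PROOFS =====

-- ===== VERDICT (by name: the statement is the Claim_ definition above) =====
theorem findAB_eq (suf pre : List Int) :
    findA (pre ++ suf).sum suf pre.length pre.sum
      = findB (pre ++ suf) suf.length pre.length := by
  induction suf generalizing pre with
  | nil => simp [findA, findB]
  | cons x rest ih =>
    have htake : ((pre ++ x :: rest).take pre.length) = pre := by simp
    have hdrop : ((pre ++ x :: rest).drop (pre.length + 1)) = rest := by
      rw [show pre.length + 1 = (pre ++ [x]).length by simp,
          show pre ++ x :: rest = (pre ++ [x]) ++ rest by simp]
      exact List.drop_left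
    have hcond : (pre.sum = (pre ++ x :: rest).sum - pre.sum - x)
        ↔ (pre.sum = rest.sum) := by
      simp only [List.sum_append, List.sum_cons]; omega
    by_cases h : pre.sum = rest.sum
    · simp only [findA, findB, List.length_cons, htake, hdrop,
        if_pos (hcond.mpr h), if_pos h]
    · simp only [findA, findB, List.length_cons, htake, hdrop,
        if_neg (fun hh => h (hcond.mp hh)), if_neg h]
      simpa using ih (pre ++ [x])

theorem find_even_index_spec : Claim_equal_find_even_index := by
  intro arr _
  unfold Spec_find_even_index find_even_index find_even_index_alt
  simpa using findAB_eq arr []
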